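-- pv_equiv track=rewrite | github.com/vikdir134/AUTOMATIZACION-VENTAS-SUNAT | FACTURAS/main_dim_productos.py | pick_family
-- ===== SOURCE A (Python) =====
-- def pick_family(tokens):
--     st = set(tokens)
--
--     # prioridad: ALQUITRANADO gana a todo
--     if "ALQUITRANADO" in st:
--         return "ALQUITRANADO"
--
--     # DRIZA gana a SOGA
--     if "DRIZA" in st:
--         return "DRIZA"
--
--     for fam in ["CABO","CINTA","CORDEL","CUERDA","HILO","FIBRA"]:
--         if fam in st:
--             return fam
--
--     # POLIESTER solo si no cayó en anteriores
--     if "POLIESTER" in st: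
--         return "POLIESTER"
--
--     if "SOGA" in st:
--         return "SOGA"
--
--     if "TRENZADO" in st:
--         return "TRENZADO"
--
--     return "NO ESPECIFICADO"
-- ===== SOURCE B (Python) =====
-- def pick_family(tokens):
--     order = ["ALQUITRANADO", "DRIZA", "CABO", "CINTA", "CORDEL",
--              "CUERDA", "HILO", "FIBRA", "POLIESTER", "SOGA", "TRENZADO"]
--     rank = {fam: i for i, fam in enumerate(order)}
--     best = None
--     for tok in tokens:
--         r = rank.get(tok)
--         if r is not None and (best is None or r < best[0]):
--             best = (r, tok)
--     return best[1] if best is not None else "NO ESPECIFICADO"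
-- ===== Notes on version B (the rewrite author's own statement) =====
-- stated objective: alternative
-- what changed: Replaces A's fixed chain of priority membership tests against a set of the tokens by a single pass over the tokens themselves, looking each token up in a label-to-rank table and keeping the (rank, label) pair with the smallest rank.
import Mathlib
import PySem

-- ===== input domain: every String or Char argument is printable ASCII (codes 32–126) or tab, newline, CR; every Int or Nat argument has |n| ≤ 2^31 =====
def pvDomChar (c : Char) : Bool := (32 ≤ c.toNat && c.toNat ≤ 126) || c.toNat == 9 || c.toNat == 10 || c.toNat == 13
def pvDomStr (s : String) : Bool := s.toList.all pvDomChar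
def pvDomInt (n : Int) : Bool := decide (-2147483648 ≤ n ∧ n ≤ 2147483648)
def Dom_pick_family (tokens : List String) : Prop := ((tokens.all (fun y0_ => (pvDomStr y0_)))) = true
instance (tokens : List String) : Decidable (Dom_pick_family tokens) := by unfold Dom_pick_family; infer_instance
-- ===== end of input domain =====

-- B replaces A's fixed chain of priority membership tests by one pass over the tokens
-- with a label→rank table and a running minimum-rank accumulator (objective: alternative).


-- ===== PORT A =====
-- the `for fam in [...]` loop with its early return
def pvFamLoop (st : PySem.Set String) : List String → Option String
  | [] => none
  | f :: fs => if PySem.Set.contains st f then some f else pvFamLoop st fs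

def pick_family (tokens : List String) : String :=
  let st : PySem.Set String := PySem.Set.ofList tokens
  if PySem.Set.contains st "ALQUITRANADO" then "ALQUITRANADO"
  else if PySem.Set.contains st "DRIZA" then "DRIZA"
  else
    match pvFamLoop st ["CABO", "CINTA", "CORDEL", "CUERDA", "HILO", "FIBRA"] with
    | some fam => fam
    | none =>
      if PySem.Set.contains st "POLIESTER" then "POLIESTER"
      else if PySem.Set.contains st "SOGA" then "SOGA"
      else if PySem.Set.contains st "TRENZADO" then "TRENZADO"
      else "NO ESPECIFICADO"

-- ===== PORT B =====
def pvOrder : List String :=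
  ["ALQUITRANADO", "DRIZA", "CABO", "CINTA", "CORDEL",
   "CUERDA", "HILO", "FIBRA", "POLIESTER", "SOGA", "TRENZADO"]

-- rank = {fam: i for i, fam in enumerate(order)}
def pvRanks : PySem.Dict String Int :=
  (PySem.List.enumerate pvOrder).foldl (fun d p => d.insert p.2 p.1) PySem.Dict.empty

-- the loop body: update best with tok's rank, if tok has one
def pvStep (best : Option (Int × String)) (tok : String) : Option (Int × String) :=
  match PySem.Dict.get? pvRanks tok with
  | none => best
  | some r =>
    match best with
    | none => some (r, tok)
    | some (b, l) => if r < b then some (r, tok) else some (b, l)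

def pick_family_alt (tokens : List String) : String :=
  match tokens.foldl pvStep none with
  | none => "NO ESPECIFICADO"
  | some (_, t) => t

-- ===== PRECONDITION & SPEC =====
def Spec_pick_family (tokens : List String) (out : String) : Prop := out = pick_family_alt tokens
instance (tokens : List String) (out : String) : Decidable (Spec_pick_family tokens out) := by unfold Spec_pick_family; infer_instance

-- ===== CLAIM (what is proved, stated in full; the proofs are below) =====
def Claim_equal_pick_family : Prop := ∀ (tokens : List String), Dom_pick_family tokens → Spec_pick_family tokens (pick_family tokens)

-- ===== LEMMAS AND PROOFS =====
-- the label whose rank is k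
def pvLabel (k : Nat) : String := pvOrder.getD k ""

-- every key of pvRanks is one of the 11 labels, paired with its rank
theorem pvRank_cases (tok : String) :
    PySem.Dict.get? pvRanks tok = none ∨
    ∃ k : Nat, k ≤ 10 ∧ tok = pvLabel k ∧ PySem.Dict.get? pvRanks tok = some (k : Int) := by
  by_cases hm : tok ∈ pvOrder
  · simp only [pvOrder, List.mem_cons, List.not_mem_nil, or_false] at hm
    rcases hm with e|e|e|e|e|e|e|e|e|e|e
    · exact Or.inr ⟨0, by omega, by rw [e]; rfl, by rw [e]; decide⟩
    · exact Or.inr ⟨1, by omega, by rw [e]; rfl, by rw [e]; decide⟩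
    · exact Or.inr ⟨2, by omega, by rw [e]; rfl, by rw [e]; decide⟩
    · exact Or.inr ⟨3, by omega, by rw [e]; rfl, by rw [e]; decide⟩
    · exact Or.inr ⟨4, by omega, by rw [e]; rfl, by rw [e]; decide⟩
    · exact Or.inr ⟨5, by omega, by rw [e]; rfl, by rw [e]; decide⟩
    · exact Or.inr ⟨6, by omega, by rw [e]; rfl, by rw [e]; decide⟩
    · exact Or.inr ⟨7, by omega, by rw [e]; rfl, by rw [e]; decide⟩
    · exact Or.inr ⟨8, by omega, by rw [e]; rfl, by rw [e]; decide⟩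
    · exact Or.inr ⟨9, by omega, by rw [e]; rfl, by rw [e]; decide⟩
    · exact Or.inr ⟨10, by omega, by rw [e]; rfl, by rw [e]; decide⟩
  · refine Or.inl ?_
    rw [PySem.Dict.get?_eq_none_iff_not_mem_keys]
    have hk : pvRanks.keys = pvOrder := by decide
    rw [hk]; exact hm

theorem pvRank_label (k : Nat) (hk : k ≤ 10) :
    PySem.Dict.get? pvRanks (pvLabel k) = some (k : Int) := by
  interval_cases k <;> decide

theorem pvLabel_inj : ∀ j < 11, ∀ k < 11, pvLabel j = pvLabel k → j = k := by decide

-- the fold returns rank k's label once label k occurs and no smaller-ranked label does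
theorem pvFold_min (k : Nat) (hk : k ≤ 10) :
    ∀ (tokens : List String) (acc : Option (Int × String)),
      (∀ j, j < k → pvLabel j ∉ tokens) →
      (pvLabel k ∈ tokens ∨ acc = some ((k : Int), pvLabel k)) →
      (acc = none ∨ ∃ r : Nat, k ≤ r ∧ r ≤ 10 ∧ acc = some ((r : Int), pvLabel r)) →
      tokens.foldl pvStep acc = some ((k : Int), pvLabel k) := by
  intro tokens
  induction tokens with
  | nil =>
    intro acc _ h2 _
    rcases h2 with h2 | h2
    · simp at h2
    · simpa using h2
  | cons tok ts ih =>
    intro acc h1 h2 h3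
    have hstep : ∀ acc', pvStep acc tok = acc' →
        (pvLabel k ∈ ts ∨ acc' = some ((k : Int), pvLabel k)) →
        (acc' = none ∨ ∃ r : Nat, k ≤ r ∧ r ≤ 10 ∧ acc' = some ((r : Int), pvLabel r)) →
        (tok :: ts).foldl pvStep acc = some ((k : Int), pvLabel k) := by
      intro acc' heq hm hinv
      simp only [List.foldl_cons]
      rw [heq]
      exact ih acc' (fun j hj hmem => h1 j hj (List.mem_cons_of_mem _ hmem)) hm hinv
    rcases pvRank_cases tok with hr | ⟨r, hr10, htok, hget⟩
    · -- token not in the table: state unchanged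
      have hs : pvStep acc tok = acc := by simp [pvStep, hr]
      refine hstep acc hs ?_ h3
      rcases h2 with h2 | h2
      · rcases List.mem_cons.mp h2 with h2 | h2
        · exfalso
          have hlk := pvRank_label k hk
          rw [h2, hr] at hlk
          simp at hlk
        · exact Or.inl h2
      · exact Or.inr h2
    · -- token has rank r
      subst htok
      have hkr : k ≤ r := by
        by_contra hlt
        exact h1 r (by omega) List.mem_cons_self
      rcases h3 with h3 | ⟨r', hkr', hr'10, h3⟩
      · subst h3
        have hs : pvStep none (pvLabel r) = some ((r : Int), pvLabel r) := by
          simp [pvStep, hget]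
        refine hstep _ hs ?_ (Or.inr ⟨r, hkr, hr10, rfl⟩)
        by_cases hrk : r = k
        · subst hrk; exact Or.inr rfl
        · rcases h2 with h2 | h2
          · rcases List.mem_cons.mp h2 with h2 | h2
            · exact absurd (pvLabel_inj k (by omega) r (by omega) h2) (fun e => hrk e.symm)
            · exact Or.inl h2
          · simp at h2
      · subst h3
        by_cases hlt : r < r'
        · have hlt' : (r : Int) < (r' : Int) := by exact_mod_cast hlt
          have hs : pvStep (some ((r' : Int), pvLabel r')) (pvLabel r) = some ((r : Int), pvLabel r) := by
            simp [pvStep, hget, hlt']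
          refine hstep _ hs ?_ (Or.inr ⟨r, hkr, hr10, rfl⟩)
          by_cases hrk : r = k
          · subst hrk; exact Or.inr rfl
          · rcases h2 with h2 | h2
            · rcases List.mem_cons.mp h2 with h2 | h2
              · exact absurd (pvLabel_inj k (by omega) r (by omega) h2) (fun e => hrk e.symm)
              · exact Or.inl h2
            · have hx := congrArg Prod.fst ((Option.some.injEq _ _).mp h2)
              simp at hx
              omega
        · have hlt' : ¬ ((r : Int) < (r' : Int)) := by exact_mod_cast hlt
          have hs : pvStep (some ((r' : Int), pvLabel r')) (pvLabel r) = some ((r' : Int), pvLabel r') := by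
            simp [pvStep, hget, hlt']
          refine hstep _ hs ?_ (Or.inr ⟨r', hkr', hr'10, rfl⟩)
          by_cases hr'k : r' = k
          · subst hr'k; exact Or.inr rfl
          · rcases h2 with h2 | h2
            · rcases List.mem_cons.mp h2 with h2 | h2
              · have hrk : k = r := pvLabel_inj k (by omega) r (by omega) h2
                omega
              · exact Or.inl h2
            · have hx := congrArg Prod.fst ((Option.some.injEq _ _).mp h2)
              simp at hx
              omega

-- the fold stays none when no label occurs among the tokens
theorem pvFold_none :
    ∀ tokens : List String, (∀ j, j ≤ 10 → pvLabel j ∉ tokens) →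
      tokens.foldl pvStep (none : Option (Int × String)) = none := by
  intro tokens
  induction tokens with
  | nil => intro _; rfl
  | cons tok ts ih =>
    intro h
    rcases pvRank_cases tok with hr | ⟨r, hr10, htok, _⟩
    · simp only [List.foldl_cons]
      have hs : pvStep none tok = none := by simp [pvStep, hr]
      rw [hs]
      exact ih (fun j hj hmem => h j hj (List.mem_cons_of_mem _ hmem))
    · exact absurd (by rw [← htok]; exact List.mem_cons_self : pvLabel r ∈ tok :: ts) (h r hr10)

-- the Bool A branches on, as plain membership in tokens
theorem pvContains_iff (tokens : List String) (s : String) :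
    PySem.Set.contains (PySem.Set.ofList tokens) s = true ↔ s ∈ tokens := by
  rw [PySem.Set.contains_iff, PySem.Set.mem_ofList]

-- ===== VERDICT (by name: the statement is the Claim_ definition above) =====
theorem pick_family_spec : Claim_equal_pick_family := by
  unfold Claim_equal_pick_family
  intro tokens _
  unfold Spec_pick_family pick_family pick_family_alt
  by_cases h0 : "ALQUITRANADO" ∈ tokens
  · rw [pvFold_min 0 (by omega) tokens none (by omega) (Or.inl h0) (Or.inl rfl)]
    rw [if_pos ((pvContains_iff tokens _).mpr h0)]
    rfl
  · rw [if_neg (by simpa [pvContains_iff] using h0)]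
    by_cases h1 : "DRIZA" ∈ tokens
    · rw [pvFold_min 1 (by omega) tokens none
        (by intro j hj; interval_cases j; simpa using h0) (Or.inl h1) (Or.inl rfl)]
      rw [if_pos ((pvContains_iff tokens _).mpr h1)]
      rfl
    · rw [if_neg (by simpa [pvContains_iff] using h1)]
      by_cases h2 : "CABO" ∈ tokens
      · rw [pvFold_min 2 (by omega) tokens none
          (by intro j hj; interval_cases j <;> simp_all [pvLabel, pvOrder]) (Or.inl h2) (Or.inl rfl)]
        simp only [pvFamLoop]
        rw [if_pos ((pvContains_iff tokens _).mpr h2)]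
        rfl
      · by_cases h3 : "CINTA" ∈ tokens
        · rw [pvFold_min 3 (by omega) tokens none
            (by intro j hj; interval_cases j <;> simp_all [pvLabel, pvOrder]) (Or.inl h3) (Or.inl rfl)]
          simp only [pvFamLoop]
          rw [if_neg (by simpa [pvContains_iff] using h2),
              if_pos ((pvContains_iff tokens _).mpr h3)]
          rfl
        · by_cases h4 : "CORDEL" ∈ tokens
          · rw [pvFold_min 4 (by omega) tokens none
              (by intro j hj; interval_cases j <;> simp_all [pvLabel, pvOrder]) (Or.inl h4) (Or.inl rfl)]
            simp only [pvFamLoop]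
            rw [if_neg (by simpa [pvContains_iff] using h2),
                if_neg (by simpa [pvContains_iff] using h3),
                if_pos ((pvContains_iff tokens _).mpr h4)]
            rfl
          · by_cases h5 : "CUERDA" ∈ tokens
            · rw [pvFold_min 5 (by omega) tokens none
                (by intro j hj; interval_cases j <;> simp_all [pvLabel, pvOrder]) (Or.inl h5) (Or.inl rfl)]
              simp only [pvFamLoop]
              rw [if_neg (by simpa [pvContains_iff] using h2),
                  if_neg (by simpa [pvContains_iff] using h3),
                  if_neg (by simpa [pvContains_iff] using h4),
                  if_pos ((pvContains_iff tokens _).mpr h5)]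
              rfl
            · by_cases h6 : "HILO" ∈ tokens
              · rw [pvFold_min 6 (by omega) tokens none
                  (by intro j hj; interval_cases j <;> simp_all [pvLabel, pvOrder]) (Or.inl h6) (Or.inl rfl)]
                simp only [pvFamLoop]
                rw [if_neg (by simpa [pvContains_iff] using h2),
                    if_neg (by simpa [pvContains_iff] using h3),
                    if_neg (by simpa [pvContains_iff] using h4),
                    if_neg (by simpa [pvContains_iff] using h5),
                    if_pos ((pvContains_iff tokens _).mpr h6)]
                rfl
              · by_cases h7 : "FIBRA" ∈ tokens
                · rw [pvFold_min 7 (by omega) tokens none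
                    (by intro j hj; interval_cases j <;> simp_all [pvLabel, pvOrder]) (Or.inl h7) (Or.inl rfl)]
                  simp only [pvFamLoop]
                  rw [if_neg (by simpa [pvContains_iff] using h2),
                      if_neg (by simpa [pvContains_iff] using h3),
                      if_neg (by simpa [pvContains_iff] using h4),
                      if_neg (by simpa [pvContains_iff] using h5),
                      if_neg (by simpa [pvContains_iff] using h6),
                      if_pos ((pvContains_iff tokens _).mpr h7)]
                  rfl
                · have hloop : pvFamLoop (PySem.Set.ofList tokens)
                      ["CABO", "CINTA", "CORDEL", "CUERDA", "HILO", "FIBRA"] = none := by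
                    simp only [pvFamLoop]
                    rw [if_neg (by simpa [pvContains_iff] using h2),
                        if_neg (by simpa [pvContains_iff] using h3),
                        if_neg (by simpa [pvContains_iff] using h4),
                        if_neg (by simpa [pvContains_iff] using h5),
                        if_neg (by simpa [pvContains_iff] using h6),
                        if_neg (by simpa [pvContains_iff] using h7)]
                  rw [hloop]
                  by_cases h8 : "POLIESTER" ∈ tokens
                  · rw [pvFold_min 8 (by omega) tokens none
                      (by intro j hj; interval_cases j <;> simp_all [pvLabel, pvOrder]) (Or.inl h8) (Or.inl rfl)]
                    rw [if_pos ((pvContains_iff tokens _).mpr h8)]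
                    rfl
                  · rw [if_neg (by simpa [pvContains_iff] using h8)]
                    by_cases h9 : "SOGA" ∈ tokens
                    · rw [pvFold_min 9 (by omega) tokens none
                        (by intro j hj; interval_cases j <;> simp_all [pvLabel, pvOrder]) (Or.inl h9) (Or.inl rfl)]
                      rw [if_pos ((pvContains_iff tokens _).mpr h9)]
                      rfl
                    · rw [if_neg (by simpa [pvContains_iff] using h9)]
                      by_cases h10 : "TRENZADO" ∈ tokens
                      · rw [pvFold_min 10 (by omega) tokens none
                          (by intro j hj; interval_cases j <;> simp_all [pvLabel, pvOrder]) (Or.inl h10) (Or.inl rfl)]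
                        rw [if_pos ((pvContains_iff tokens _).mpr h10)]
                        rfl
                      · rw [if_neg (by simpa [pvContains_iff] using h10)]
                        rw [pvFold_none tokens (by intro j hj; interval_cases j <;> simp_all [pvLabel, pvOrder])]
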